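-- pv_equiv track=rewrite | github.com/ministat/spark-metrics | monitor-by-metrics/spark/spark.py | getAllMetrics
-- ===== SOURCE A (Python) =====
-- def getAllMetrics(jData, statMap):
--    m={}
--    for k,v in statMap.items():
--        for t in jData:
--           if k in m:
--             m[k]+=t[v] if v in t else 0
--           else:
--             m[k]=t[v] if v in t else 0
--    return m
-- ===== SOURCE B (Python) =====
-- def getAllMetrics(jData, statMap):
--     # Phase 1: one pass over the records aggregating a per-FIELD totals table.
--     totals = {}
--     for t in jData:
--         for f, x in t.items():
--             totals[f] = totals.get(f, 0) + x
--     # Phase 2: one lookup per mapped key; no scan over the records per key.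
--     return {k: totals.get(v, 0) for k, v in statMap.items()}
-- ===== Notes on version B (the rewrite author's own statement) =====
-- stated objective: faster
-- what changed: B replaces A's per-key scan over all records with two staged passes: it first aggregates one per-field totals dict in a single pass over the records, then builds the result with one O(1) lookup per statMap key, so the inner record scan per key disappears.
-- outside the precondition, e.g. on getAllMetrics([], {'a': 'x'}): A returns {}, B returns {'a': 0}
import Mathlib
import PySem

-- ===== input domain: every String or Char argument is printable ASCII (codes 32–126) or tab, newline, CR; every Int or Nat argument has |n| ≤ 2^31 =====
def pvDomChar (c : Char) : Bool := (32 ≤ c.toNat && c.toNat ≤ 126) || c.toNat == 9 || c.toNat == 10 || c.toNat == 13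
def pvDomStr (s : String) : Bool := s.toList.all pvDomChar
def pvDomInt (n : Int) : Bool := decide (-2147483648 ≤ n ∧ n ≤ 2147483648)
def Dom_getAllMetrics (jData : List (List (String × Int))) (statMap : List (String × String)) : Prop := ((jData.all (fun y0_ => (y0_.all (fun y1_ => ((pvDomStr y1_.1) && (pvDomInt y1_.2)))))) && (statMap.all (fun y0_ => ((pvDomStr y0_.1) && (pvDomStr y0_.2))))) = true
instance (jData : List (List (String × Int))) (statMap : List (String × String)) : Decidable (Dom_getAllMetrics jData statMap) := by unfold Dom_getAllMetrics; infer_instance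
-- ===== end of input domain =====

-- B is a two-phase algorithm: one pass over the records aggregating per-FIELD totals, then one
-- lookup per statMap key — removing A's scan over all records for each key (objective: faster).

-- ===== PORT A =====
-- ports the expression `t[v] if v in t else 0` (t is a dict)
def pvDelta (t : List (String × Int)) (v : String) : Int :=
  if (PySem.Dict.ofList t).contains v then (PySem.Dict.ofList t).getD v 0 else 0

def getAllMetrics (jData : List (List (String × Int))) (statMap : List (String × String)) : List (String × Int) :=
  ((PySem.Dict.ofList statMap).items.foldl (fun m kv =>
      jData.foldl (fun m t =>
        if m.contains kv.1 then m.insert kv.1 (m.getD kv.1 0 + pvDelta t kv.2)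
        else m.insert kv.1 (pvDelta t kv.2)) m)
    (PySem.Dict.empty : PySem.Dict String Int)).items

-- ===== PORT B =====
def getAllMetrics_alt (jData : List (List (String × Int))) (statMap : List (String × String)) : List (String × Int) :=
  -- phase 1: totals[f] = totals.get(f, 0) + x for every field f of every record
  let totals : PySem.Dict String Int :=
    jData.foldl (fun tot t =>
      (PySem.Dict.ofList t).items.foldl (fun tot fv => tot.insert fv.1 (tot.getD fv.1 0 + fv.2)) tot)
    PySem.Dict.empty
  -- phase 2: {k: totals.get(v, 0) for k, v in statMap.items()}
  ((PySem.Dict.ofList statMap).items.foldl (fun m kv => m.insert kv.1 (totals.getD kv.2 0))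
    (PySem.Dict.empty : PySem.Dict String Int)).items

-- ===== PRECONDITION & SPEC =====
-- Pre_ excludes empty jData with nonempty statMap, a defensible corner where A returns {} (no key is
-- ever inserted) while B's comprehension naturally maps every key to 0; both values are reasonable.
def Pre_getAllMetrics (jData : List (List (String × Int))) (statMap : List (String × String)) : Prop :=
  jData ≠ [] ∨ statMap = []
instance (jData : List (List (String × Int))) (statMap : List (String × String)) : Decidable (Pre_getAllMetrics jData statMap) := by unfold Pre_getAllMetrics; infer_instance

def pvWitness_getAllMetrics : (List (List (String × Int))) × (List (String × String)) :=
  ([[("a", 1), ("b", 2)], [("a", 3)]], [("k", "a"), ("l", "c")])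

def Spec_getAllMetrics (jData : List (List (String × Int))) (statMap : List (String × String)) (out : List (String × Int)) : Prop := out = getAllMetrics_alt jData statMap
instance (jData : List (List (String × Int))) (statMap : List (String × String)) (out : List (String × Int)) : Decidable (Spec_getAllMetrics jData statMap out) := by unfold Spec_getAllMetrics; infer_instance

-- ===== CLAIM (what is proved, stated in full; the proofs are below) =====
def Claim_equal_getAllMetrics : Prop := ∀ (jData : List (List (String × Int))) (statMap : List (String × String)), Dom_getAllMetrics jData statMap → Pre_getAllMetrics jData statMap → Spec_getAllMetrics jData statMap (getAllMetrics jData statMap)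

-- ===== LEMMAS AND PROOFS =====

-- total of `t[v] if v in t else 0` over a list of records
def pvDsum (jData : List (List (String × Int))) (v : String) : Int :=
  (jData.map (fun t => pvDelta t v)).sum

theorem pvDelta_eq_getD (t : List (String × Int)) (v : String) :
    pvDelta t v = (PySem.Dict.ofList t).getD v 0 := by
  unfold pvDelta
  by_cases h : (PySem.Dict.ofList t).contains v
  · simp [h]
  · simp [h, PySem.Dict.getD_of_not_contains _ _ (by simpa using h)]

-- ---------- A side ----------

-- A's inner record loop once the key is present: pure accumulation at key k
theorem pv_condFold (k v : String) (ts : List (List (String × Int)))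
    (m : PySem.Dict String Int) : ∀ (c : Int),
    ts.foldl (fun m t =>
        if m.contains k then m.insert k (m.getD k 0 + pvDelta t v)
        else m.insert k (pvDelta t v)) (m.insert k c)
      = m.insert k (c + pvDsum ts v) := by
  induction ts with
  | nil => intro c; simp [pvDsum]
  | cons t ts ih =>
      intro c
      simp only [List.foldl_cons, PySem.Dict.contains_insert_self, if_pos,
        PySem.Dict.getD_insert_self, PySem.Dict.insert_insert_self]
      rw [ih (c + pvDelta t v)]
      congr 1
      simp [pvDsum]
      ring

-- A's key loop over fresh keys appends one finished pair per key
theorem pv_A_main (t : List (String × Int)) (ts : List (List (String × Int))) :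
    ∀ (l : List (String × String)) (m : PySem.Dict String Int),
    (m.keys ++ l.map (·.1)).Nodup →
    (l.foldl (fun m kv =>
        (t :: ts).foldl (fun m t' =>
          if m.contains kv.1 then m.insert kv.1 (m.getD kv.1 0 + pvDelta t' kv.2)
          else m.insert kv.1 (pvDelta t' kv.2)) m) m).items
      = m.items ++ l.map (fun kv => (kv.1, pvDsum (t :: ts) kv.2)) := by
  intro l
  induction l with
  | nil => intro m _; simp
  | cons kv rest ih =>
      intro m h
      have hk : kv.1 ∉ m.keys := by
        rcases List.nodup_append.mp h with ⟨-, -, hdisj⟩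
        intro hmem
        exact hdisj kv.1 hmem kv.1 (by simp) rfl
      have hc : m.contains kv.1 = false := by
        cases hb : m.contains kv.1 with
        | false => rfl
        | true => exact absurd ((PySem.Dict.contains_iff_mem_keys m kv.1).mp hb) hk
      rw [List.foldl_cons]
      rw [List.foldl_cons, if_neg (by simp [hc]),
        pv_condFold kv.1 kv.2 ts m (pvDelta t kv.2)]
      have hval : pvDelta t kv.2 + pvDsum ts kv.2 = pvDsum (t :: ts) kv.2 := by
        simp [pvDsum]
      rw [hval, List.map_cons]
      rw [ih (m.insert kv.1 (pvDsum (t :: ts) kv.2))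
        (by rw [PySem.Dict.keys_insert_of_not_contains m _ hc]; simpa using h)]
      rw [PySem.Dict.items_insert_of_not_contains m _ hc]
      simp

-- ---------- B side ----------

-- counter-style loop: lookup after the loop = lookup before + the matching contributions
theorem pv_counterFold (v : String) : ∀ (l : List (String × Int)) (d : PySem.Dict String Int),
    (l.foldl (fun tot fv => tot.insert fv.1 (tot.getD fv.1 0 + fv.2)) d).getD v 0
      = d.getD v 0 + ((l.filter (fun fv => fv.1 == v)).map (·.2)).sum := by
  intro l
  induction l with
  | nil => intro d; simp
  | cons p l ih =>
      intro d
      rw [List.foldl_cons, ih]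
      by_cases hp : p.1 = v
      · subst hp
        simp [PySem.Dict.getD_insert_self]
        ring
      · rw [PySem.Dict.getD_insert, if_neg (Ne.symm hp)]
        simp [hp]

-- a key absent from the list filters to nothing
theorem pv_filter_nil (v : String) : ∀ (l : List (String × Int)),
    v ∉ l.map (·.1) → l.filter (fun fv => fv.1 == v) = [] := by
  intro l
  induction l with
  | nil => intro _; rfl
  | cons p l ih =>
      intro h
      have h1 : p.1 ≠ v := by intro he; exact h (by simp [he])
      simp only [List.filter_cons]
      rw [if_neg (by simp [h1]), ih (fun hm => h (by simp [hm]))]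

-- on a nodup-key association list, the matching contributions sum to the dict lookup
theorem pv_filter_sum (v : String) : ∀ (l : List (String × Int)),
    (l.map (·.1)).Nodup →
    ((l.filter (fun fv => fv.1 == v)).map (·.2)).sum = (PySem.Dict.mk l).getD v 0 := by
  intro l
  induction l with
  | nil => intro _; simp [PySem.Dict.getD_eq_get?_getD]; rfl
  | cons p l ih =>
      intro h
      rw [List.map_cons] at h
      obtain ⟨hnm, hnd⟩ := List.nodup_cons.mp h
      rw [PySem.Dict.getD_eq_get?_getD, PySem.Dict.get?_mk_cons]
      by_cases hp : p.1 = v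
      · subst hp
        rw [List.filter_cons, if_pos (by simp), pv_filter_nil p.1 l hnm]
        simp
      · rw [List.filter_cons, if_neg (by simp [hp]), if_neg (by simp [hp]),
          ih hnd, PySem.Dict.getD_eq_get?_getD]

-- phase 1: the totals dict looks up to the per-field sum over all records
theorem pv_totals (v : String) : ∀ (jData : List (List (String × Int))) (d : PySem.Dict String Int),
    (jData.foldl (fun tot t =>
        (PySem.Dict.ofList t).items.foldl
          (fun tot fv => tot.insert fv.1 (tot.getD fv.1 0 + fv.2)) tot) d).getD v 0
      = d.getD v 0 + pvDsum jData v := by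
  intro jData
  induction jData with
  | nil => intro d; simp [pvDsum]
  | cons t ts ih =>
      intro d
      rw [List.foldl_cons, ih, pv_counterFold v]
      have hnd : ((PySem.Dict.ofList t).items.map (·.1)).Nodup := by
        have h := PySem.Dict.nodup_keys_ofList t
        simpa [PySem.Dict.keys] using h
      rw [pv_filter_sum v _ hnd]
      have hmk : PySem.Dict.mk (PySem.Dict.ofList t).items = PySem.Dict.ofList t := rfl
      rw [hmk, ← pvDelta_eq_getD]
      simp [pvDsum]
      ring

-- ===== VERDICT (by name: the statement is the Claim_ definition above) =====
theorem getAllMetrics_spec : Claim_equal_getAllMetrics := by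
  intro jData statMap _ hpre
  show getAllMetrics jData statMap = getAllMetrics_alt jData statMap
  have hnd : ((PySem.Dict.ofList statMap).items.map (·.1)).Nodup := by
    have h := PySem.Dict.nodup_keys_ofList statMap
    simpa [PySem.Dict.keys] using h
  have hB : getAllMetrics_alt jData statMap
      = (PySem.Dict.ofList statMap).items.map (fun kv => (kv.1, pvDsum jData kv.2)) := by
    unfold getAllMetrics_alt
    rw [PySem.Dict.items_foldl_insert_fresh _ _ _ _ (fun a _ => PySem.Dict.contains_empty _) hnd]
    have : ∀ kv : String × String, kv ∈ (PySem.Dict.ofList statMap).items →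
        ((jData.foldl (fun tot t =>
            (PySem.Dict.ofList t).items.foldl
              (fun tot fv => tot.insert fv.1 (tot.getD fv.1 0 + fv.2)) tot)
          (PySem.Dict.empty : PySem.Dict String Int)).getD kv.2 0) = pvDsum jData kv.2 := by
      intro kv _
      rw [pv_totals kv.2 jData PySem.Dict.empty, PySem.Dict.getD_empty]
      ring
    simp only [show (PySem.Dict.empty : PySem.Dict String Int).items = [] from rfl, List.nil_append]
    exact List.map_congr_left (fun kv hkv => by rw [this kv hkv])
  cases jData with
  | nil =>
      rcases hpre with h | h
      · exact absurd rfl h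
      · subst h; rfl
  | cons t ts =>
      rw [hB]
      show ((PySem.Dict.ofList statMap).items.foldl _ PySem.Dict.empty).items = _
      rw [pv_A_main t ts (PySem.Dict.ofList statMap).items PySem.Dict.empty
        (by simpa [PySem.Dict.keys_empty] using hnd)]
      simp [show (PySem.Dict.empty : PySem.Dict String Int).items = [] from rfl]
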